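-- pv_equiv track=rewrite | github.com/hanxgaku/hw | hw1.py | permutations2
-- ===== SOURCE A (Python) =====
-- def permutations2(s: str) -> [str]:
--     if not s:
--         return [""]
--     elif len(s) == 1:
--         return [s]
--     x = []
--     p = []
--     p = permutations2(s[1:])
--     x = x + [s[0] + "|" + j for j in p]
--     x = x + [s[0] + j for j in p]
--     return x
-- ===== SOURCE B (Python) =====
-- def permutations2(s: str) -> [str]:
--     # left-to-right fold: thread each partial result through both choices at each gap
--     if not s:
--         return [""]
--     res = [s[0]]
--     for c in s[1:]:
--         res = [t for r in res for t in (r + "|" + c, r + c)]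
--     return res
-- ===== Notes on version B (the rewrite author's own statement) =====
-- stated objective: simpler
-- what changed: Replaces A's tail recursion (which maps the head onto each recursive result twice and concatenates) with a single left-to-right fold that expands each partial result into its two continuations at every gap.
import Mathlib
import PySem

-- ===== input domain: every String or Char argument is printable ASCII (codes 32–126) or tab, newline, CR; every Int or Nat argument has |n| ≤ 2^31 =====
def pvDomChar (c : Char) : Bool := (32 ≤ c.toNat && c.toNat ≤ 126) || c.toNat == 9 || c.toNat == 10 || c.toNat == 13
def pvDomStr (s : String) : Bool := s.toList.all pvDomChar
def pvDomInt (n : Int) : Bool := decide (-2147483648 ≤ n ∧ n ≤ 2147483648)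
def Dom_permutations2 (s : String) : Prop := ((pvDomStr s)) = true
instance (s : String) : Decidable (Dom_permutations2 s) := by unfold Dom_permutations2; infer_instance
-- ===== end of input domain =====

-- B replaces A's recursion on the tail with a single left-to-right fold over the gaps (simpler decomposition, same cost).


-- ===== PORT A =====
-- A's recursion, over the string's character list (strings are char lists): empty → [""],
-- singleton → [s], else prefix s[0]+"|" and s[0] onto each recursive result of s[1:].
def permutations2A : List Char → List (List Char)
  | [] => [[]]
  | [c] => [[c]]
  | c :: d :: l =>
      ((permutations2A (d :: l)).map (fun j => c :: '|' :: j)) ++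
      ((permutations2A (d :: l)).map (fun j => c :: j))

def permutations2 (s : String) : List String :=
  (permutations2A s.toList).map String.ofList

-- ===== PORT B =====
-- B's fold step: each partial result r becomes r+"|"+c and r+c.
def permutations2Step (acc : List (List Char)) (c : Char) : List (List Char) :=
  acc.flatMap (fun r => [r ++ ['|', c], r ++ [c]])

def permutations2_alt (s : String) : List String :=
  match s.toList with
  | [] => [""]
  | c :: l => ((l.foldl permutations2Step [[c]]).map String.ofList)

-- ===== PRECONDITION & SPEC =====
def Spec_permutations2 (s : String) (out : List String) : Prop := out = permutations2_alt s
instance (s : String) (out : List String) : Decidable (Spec_permutations2 s out) := by unfold Spec_permutations2; infer_instance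

-- ===== CLAIM (what is proved, stated in full; the proofs are below) =====
def Claim_equal_permutations2 : Prop := ∀ (s : String), Dom_permutations2 s → Spec_permutations2 s (permutations2 s)

-- ===== LEMMAS AND PROOFS =====

theorem permutations2_step_append (a b : List (List Char)) (c : Char) :
    permutations2Step (a ++ b) c = permutations2Step a c ++ permutations2Step b c := by
  simp [permutations2Step]

theorem permutations2_foldl_append (l : List Char) (a b : List (List Char)) :
    l.foldl permutations2Step (a ++ b) =
      l.foldl permutations2Step a ++ l.foldl permutations2Step b := by
  induction l generalizing a b with
  | nil => rfl
  | cons c l ih => simp [List.foldl, permutations2_step_append, ih]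

theorem permutations2_step_map_prefix (p : List Char) (acc : List (List Char)) (c : Char) :
    permutations2Step (acc.map (fun r => p ++ r)) c =
      (permutations2Step acc c).map (fun r => p ++ r) := by
  simp [permutations2Step, List.flatMap_map, List.map_flatMap]

theorem permutations2_foldl_map_prefix (l : List Char) (p : List Char) (acc : List (List Char)) :
    l.foldl permutations2Step (acc.map (fun r => p ++ r)) =
      (l.foldl permutations2Step acc).map (fun r => p ++ r) := by
  induction l generalizing acc with
  | nil => rfl
  | cons c l ih => simp [List.foldl, permutations2_step_map_prefix, ih]

theorem permutations2A_eq_foldl (l : List Char) (c : Char) :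
    permutations2A (c :: l) = l.foldl permutations2Step [[c]] := by
  induction l generalizing c with
  | nil => rfl
  | cons d l ih =>
      have h1 : ([[c, '|', d]] : List (List Char)) = ([[d]] : List (List Char)).map (fun r => [c, '|'] ++ r) := rfl
      have h2 : ([[c, d]] : List (List Char)) = ([[d]] : List (List Char)).map (fun r => [c] ++ r) := rfl
      calc permutations2A (c :: d :: l)
          = ((permutations2A (d :: l)).map (fun j => c :: '|' :: j)) ++
            ((permutations2A (d :: l)).map (fun j => c :: j)) := rfl
        _ = ((l.foldl permutations2Step [[d]]).map (fun r => [c, '|'] ++ r)) ++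
            ((l.foldl permutations2Step [[d]]).map (fun r => [c] ++ r)) := by
              rw [ih]; rfl
        _ = (l.foldl permutations2Step (([[d]] : List (List Char)).map (fun r => [c, '|'] ++ r))) ++
            (l.foldl permutations2Step (([[d]] : List (List Char)).map (fun r => [c] ++ r))) := by
              rw [permutations2_foldl_map_prefix, permutations2_foldl_map_prefix]
        _ = l.foldl permutations2Step ([[c, '|', d]] ++ [[c, d]]) := by
              rw [permutations2_foldl_append, h1, h2]
        _ = (d :: l).foldl permutations2Step [[c]] := rfl

-- ===== VERDICT (by name: the statement is the Claim_ definition above) =====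
theorem permutations2_spec : Claim_equal_permutations2 := by
  intro s _
  unfold Spec_permutations2 permutations2 permutations2_alt
  cases h : s.toList with
  | nil => simp [permutations2A]
  | cons c l => rw [permutations2A_eq_foldl]
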